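-- pv_equiv track=rewrite | github.com/IndyD/Speaker-Verification-Capstone | generate_datasets.py | find_positive_pairs
-- ===== SOURCE A (Python) =====
-- import itertools
--
-- def find_positive_pairs(corpus_data):
--     """ Find the positions of all possible positive pairs,
--     interleaves speakers to maximize diversity """
--     positive_pair_locs = []
--     unformatted_pair_locs = []
--     for speaker, speaker_data in corpus_data.items():
--         index_list = list(range(len(speaker_data)))
--         index_combs = list(itertools.combinations(index_list, 2))
--         speaker_pair_locs = [(speaker, idx[0], idx[1]) for idx in index_combs]
--         unformatted_pair_locs.append(speaker_pair_locs)
--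
--     most_pairs = max(len(x) for x in unformatted_pair_locs)
--     for i in range(most_pairs):
--         for speaker_pair_locs in unformatted_pair_locs:
--             if len(speaker_pair_locs) >= i+1:
--                 positive_pair_locs.append(speaker_pair_locs[i])
--
--     return positive_pair_locs
-- ===== SOURCE B (Python) =====
-- def find_positive_pairs(corpus_data):
--     """ Find the positions of all possible positive pairs,
--     interleaves speakers to maximize diversity """
--     tagged = []
--     for speaker, data in corpus_data.items():
--         n = len(data)
--         pairs = [(speaker, i, j) for i in range(n) for j in range(i + 1, n)]
--         tagged.extend(enumerate(pairs))
--     tagged.sort(key=lambda t: t[0])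
--     return [pair for _, pair in tagged]
-- ===== Notes on version B (the rewrite author's own statement) =====
-- stated objective: alternative
-- what changed: B removes A's level-by-level round-robin scanning entirely: it tags every within-speaker pair with its rank inside its speaker, concatenates all tagged pairs, and obtains the interleaved order as a single stable sort by rank (stability keeps dict order among equal ranks).
import Mathlib
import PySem

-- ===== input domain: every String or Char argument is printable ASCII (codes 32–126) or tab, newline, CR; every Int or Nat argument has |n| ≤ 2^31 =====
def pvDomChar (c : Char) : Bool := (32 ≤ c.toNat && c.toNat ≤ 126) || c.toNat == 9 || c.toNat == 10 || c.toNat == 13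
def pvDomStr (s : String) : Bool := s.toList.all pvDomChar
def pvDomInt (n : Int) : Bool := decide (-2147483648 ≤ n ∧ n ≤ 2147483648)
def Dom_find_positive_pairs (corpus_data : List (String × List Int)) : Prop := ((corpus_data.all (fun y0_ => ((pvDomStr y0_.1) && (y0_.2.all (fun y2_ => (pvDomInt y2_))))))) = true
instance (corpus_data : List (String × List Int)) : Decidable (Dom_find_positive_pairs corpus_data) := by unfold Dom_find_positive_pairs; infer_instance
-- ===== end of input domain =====

-- B replaces A's level-by-level round-robin loop by tagging each pair with its rank inside its
-- speaker and doing ONE stable sort by rank (stability keeps dict order among equal ranks).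

-- ===== PORT A =====
-- itertools.combinations(l, 2), transliterated
def pvCombs2 (l : List Int) : List (Int × Int) :=
  match l with
  | [] => []
  | x :: xs => xs.map (fun y => (x, y)) ++ pvCombs2 xs

def find_positive_pairs (corpus_data : List (String × List Int)) : List (String × Int × Int) :=
  let unformatted_pair_locs := corpus_data.foldl (fun acc p =>
    let index_list := PySem.List.pyRange 0 (p.2.length : Int) 1
    let index_combs := pvCombs2 index_list
    let speaker_pair_locs := index_combs.map (fun idx => (p.1, idx.1, idx.2))
    acc ++ [speaker_pair_locs]) []
  match PySem.List.max? (unformatted_pair_locs.map (fun x => (x.length : Int))) (fun y => y) with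
  | none => []   -- Python: max() raises ValueError here (empty corpus); excluded by Pre_
  | some most_pairs =>
    (PySem.List.pyRange 0 most_pairs 1).foldl (fun acc i =>
      unformatted_pair_locs.foldl (fun acc2 q =>
        if i + 1 ≤ (q.length : Int) then acc2 ++ [PySem.List.pyGetD q i ("", 0, 0)] else acc2) acc) []

-- ===== PORT B =====
def find_positive_pairs_alt (corpus_data : List (String × List Int)) : List (String × Int × Int) :=
  let tagged := corpus_data.foldl (fun acc p =>
    let pairs := (PySem.List.pyRange 0 (p.2.length : Int) 1).flatMap (fun i =>
      (PySem.List.pyRange (i + 1) (p.2.length : Int) 1).map (fun j => (p.1, i, j)))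
    acc ++ PySem.List.enumerate pairs 0) []
  (PySem.List.sorted tagged (fun t => t.1) false).map (fun t => t.2)

-- ===== PRECONDITION & SPEC =====
-- Pre_ excludes only the empty dict, on which A's max() raises ValueError.
def Pre_find_positive_pairs (corpus_data : List (String × List Int)) : Prop := corpus_data ≠ []
instance (corpus_data : List (String × List Int)) : Decidable (Pre_find_positive_pairs corpus_data) := by unfold Pre_find_positive_pairs; infer_instance
def pvWitness_find_positive_pairs : (List (String × List Int)) := [("a", [1, 2, 3]), ("b", [0, 4])]

def Spec_find_positive_pairs (corpus_data : List (String × List Int)) (out : List (String × Int × Int)) : Prop := out = find_positive_pairs_alt corpus_data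
instance (corpus_data : List (String × List Int)) (out : List (String × Int × Int)) : Decidable (Spec_find_positive_pairs corpus_data out) := by unfold Spec_find_positive_pairs; infer_instance

-- ===== CLAIM (what is proved, stated in full; the proofs are below) =====
def Claim_equal_find_positive_pairs : Prop := ∀ (corpus_data : List (String × List Int)), Dom_find_positive_pairs corpus_data → Pre_find_positive_pairs corpus_data → Spec_find_positive_pairs corpus_data (find_positive_pairs corpus_data)
-- ===== LEMMAS AND PROOFS =====

-- the per-speaker pair list appearing in both ports
def pvSpeakerPairs (speaker : String) (data : List Int) : List (String × Int × Int) :=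
  (PySem.List.pyRange 0 (data.length : Int) 1).flatMap (fun i =>
    (PySem.List.pyRange (i + 1) (data.length : Int) 1).map (fun j => (speaker, i, j)))

-- the pairs A emits at one level
def pvRow (u : List (List (String × Int × Int))) (k : Nat) : List (String × Int × Int) :=
  (u.filter (fun q => decide (k < q.length))).map (fun q => q.getD k ("", 0, 0))

-- the tagged pairs of rank k, in speaker order (B's tagged list, restricted to rank k)
def pvTagRow (u : List (List (String × Int × Int))) (k : Nat) : List (Int × (String × Int × Int)) :=
  (u.filter (fun q => decide (k < q.length))).map (fun q => (((k : Nat) : Int), q.getD k ("", 0, 0)))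

-- pvTagRow with the first s entries of one extra pair list q already inserted
def pvG (v : List (List (String × Int × Int))) (q : List (String × Int × Int)) (s : Nat)
    (j : Nat) : List (Int × (String × Int × Int)) :=
  pvTagRow v j ++ (if j < s then [(((j : Nat) : Int), q.getD j ("", 0, 0))] else [])

lemma pvCombs2_pyRange (s : String) (n a : Int) :
    (pvCombs2 (PySem.List.pyRange a n 1)).map (fun idx => (s, idx.1, idx.2)) =
    (PySem.List.pyRange a n 1).flatMap (fun i =>
      (PySem.List.pyRange (i + 1) n 1).map (fun j => (s, i, j))) := by
  by_cases h : n ≤ a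
  · rw [PySem.List.pyRange_one_eq_nil h]; simp [pvCombs2]
  · push Not at h
    rw [PySem.List.pyRange_one_cons h]
    simp only [pvCombs2, List.map_append, List.map_map, List.flatMap_cons]
    rw [pvCombs2_pyRange s n (a + 1)]
    simp [Function.comp]
termination_by (n - a).toNat
decreasing_by omega

-- one level of A's outer loop is one row
lemma pvRowA : ∀ (u : List (List (String × Int × Int))) (k : Nat) (acc : List (String × Int × Int)),
    u.foldl (fun acc2 q => if ((k : Nat) : Int) + 1 ≤ (q.length : Int)
      then acc2 ++ [PySem.List.pyGetD q ((k : Nat) : Int) ("", 0, 0)] else acc2) acc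
    = acc ++ pvRow u k
  | [], k, acc => by simp [pvRow]
  | q :: u, k, acc => by
    simp only [List.foldl_cons]
    by_cases h : ((k : Nat) : Int) + 1 ≤ (q.length : Int)
    · rw [if_pos h, pvRowA u k]
      have hk : k < q.length := by omega
      simp [pvRow, hk, PySem.List.pyGetD_natCast]
    · rw [if_neg h, pvRowA u k]
      have hk : ¬ (k < q.length) := by omega
      simp [pvRow, hk]

-- insertBy puts x between a block it is not before and a block it is before
lemma pvInsertBy_split (x : Int × (String × Int × Int)) :
    ∀ (S1 S2 : List (Int × (String × Int × Int))),
    (∀ y ∈ S1, ¬ (x.1 < y.1)) → (∀ y ∈ S2, x.1 < y.1) →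
    PySem.List.insertBy (fun a b => decide (a.1 < b.1)) x (S1 ++ S2) = S1 ++ x :: S2
  | [], S2, _, h2 => by
    cases S2 with
    | nil => simp [PySem.List.insertBy]
    | cons y S2' =>
      have := h2 y (by simp)
      simp [PySem.List.insertBy, this]
  | y :: S1, S2, h1, h2 => by
    have hy : ¬ (x.1 < y.1) := h1 y (by simp)
    simp only [List.cons_append, PySem.List.insertBy, hy, decide_false, Bool.false_eq_true,
      if_false]
    rw [pvInsertBy_split x S1 S2 (fun z hz => h1 z (by simp [hz])) h2]

-- inserting one element of rank k into a rank-layered list appends it to layer k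
lemma pvInsert_row (k M : Nat) (hk : k < M) (x : String × Int × Int)
    (rows : Nat → List (Int × (String × Int × Int)))
    (hkey : ∀ j y, y ∈ rows j → y.1 = (j : Nat)) :
    PySem.List.insertBy (fun a b => decide (a.1 < b.1)) (((k : Nat) : Int), x)
      ((List.range M).flatMap rows)
    = (List.range M).flatMap (fun j => if j = k then rows j ++ [(((k : Nat) : Int), x)] else rows j) := by
  have hsplit : List.range M = List.range (k + 1) ++ List.range' (k + 1) (M - (k + 1)) := by
    rw [List.range_eq_range', show M = (k + 1) + (M - (k + 1)) from by omega,
      ← List.range'_append_1]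
    simp [List.range_eq_range']
  rw [hsplit, List.flatMap_append, List.flatMap_append]
  rw [pvInsertBy_split]
  · have h1 : (List.range (k + 1)).flatMap
        (fun j => if j = k then rows j ++ [(((k : Nat) : Int), x)] else rows j)
        = (List.range (k + 1)).flatMap rows ++ [(((k : Nat) : Int), x)] := by
      rw [List.range_succ, List.flatMap_append, List.flatMap_append]
      have hk0 : (List.range k).flatMap
          (fun j => if j = k then rows j ++ [(((k : Nat) : Int), x)] else rows j)
          = (List.range k).flatMap rows :=
        List.flatMap_congr (fun j hj => by
          have hjk : j ≠ k := by have := List.mem_range.mp hj; omega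
          simp [hjk])
      rw [hk0]
      simp
    have h2 : (List.range' (k + 1) (M - (k + 1))).flatMap
        (fun j => if j = k then rows j ++ [(((k : Nat) : Int), x)] else rows j)
        = (List.range' (k + 1) (M - (k + 1))).flatMap rows := by
      apply List.flatMap_congr
      intro j hj
      have := List.mem_range'.mp hj
      have : j ≠ k := by omega
      simp [this]
    rw [h1, h2]
    simp
  · intro y hy
    obtain ⟨j, hj, hyj⟩ := List.mem_flatMap.mp hy
    have := hkey j y hyj
    have hjk : j < k + 1 := List.mem_range.mp hj
    simp only [this]
    omega
  · intro y hy
    obtain ⟨j, hj, hyj⟩ := List.mem_flatMap.mp hy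
    have := hkey j y hyj
    have hjk := List.mem_range'.mp hj
    simp only [this]
    omega

lemma pvG_key (v : List (List (String × Int × Int))) (q : List (String × Int × Int)) (s : Nat) :
    ∀ j y, y ∈ pvG v q s j → y.1 = (j : Nat) := by
  intro j y hy
  unfold pvG at hy
  rcases List.mem_append.mp hy with h | h
  · obtain ⟨z, _, hz⟩ := List.mem_map.mp h
    exact hz ▸ rfl
  · split at h
    · simp at h; exact h ▸ rfl
    · simp at h

-- inserting the tagged entries s, s+1, …, of one extra pair list q fills its layers in turn
lemma pvInsertBlock (q : List (String × Int × Int)) (M : Nat) (hM : q.length ≤ M)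
    (v : List (List (String × Int × Int))) :
    ∀ n s, s + n = q.length →
    (PySem.List.enumerate (q.drop s) ((s : Nat) : Int)).foldl
      (fun acc x => PySem.List.insertBy (fun a b => decide (a.1 < b.1)) x acc)
      ((List.range M).flatMap (pvG v q s))
    = (List.range M).flatMap (pvG v q q.length) := by
  intro n
  induction n with
  | zero =>
    intro s hs
    have hs' : s = q.length := by omega
    subst hs'
    simp [PySem.List.enumerate_nil]
  | succ n ih =>
    intro s hs
    have hsl : s < q.length := by omega
    rw [List.drop_eq_getElem_cons hsl, PySem.List.enumerate_cons, List.foldl_cons]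
    rw [pvInsert_row s M (by omega) q[s] (pvG v q s) (pvG_key v q s)]
    have hrows : (fun j => if j = s then pvG v q s j ++ [(((s : Nat) : Int), q[s])] else pvG v q s j)
        = pvG v q (s + 1) := by
      funext j
      by_cases hj : j = s
      · subst hj
        simp [pvG, List.getD_eq_getElem?_getD, List.getElem?_eq_getElem hsl]
      · rcases Nat.lt_or_ge j s with h | h
        · simp [pvG, hj, h, Nat.lt_succ_of_lt h]
        · have h1 : ¬ (j < s) := by omega
          have h2 : ¬ (j < s + 1) := by omega
          simp [pvG, hj, h1, h2]
    rw [hrows]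
    have hcast : ((s : Nat) : Int) + 1 = (((s + 1 : Nat)) : Int) := by push_cast; ring
    rw [hcast, ih (s + 1) (by omega)]

-- the stable sort of the tagged list is the rank-layered list
lemma pvSorted_eq (M : Nat) :
    ∀ (u : List (List (String × Int × Int))), (∀ q ∈ u, q.length ≤ M) →
    PySem.List.sorted ((u.map (fun q => PySem.List.enumerate q 0)).flatten) (fun t => t.1) false
    = (List.range M).flatMap (pvTagRow u) := by
  intro u
  induction u using List.reverseRecOn with
  | nil =>
    intro _
    have : ∀ j ∈ List.range M, pvTagRow ([] : List (List (String × Int × Int))) j = [] := by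
      intro j _; simp [pvTagRow]
    simp [PySem.List.sorted, List.flatMap_congr this]
  | append_singleton u q ih =>
    intro hb
    have hq : q.length ≤ M := hb q (by simp)
    have hu : ∀ r ∈ u, r.length ≤ M := fun r hr => hb r (by simp [hr])
    rw [PySem.List.sorted_eq_foldl_insertBy]
    simp only [List.map_append, List.flatten_append, List.map_cons, List.map_nil,
      List.flatten_cons, List.flatten_nil, List.append_nil]
    rw [List.foldl_append]
    rw [← PySem.List.sorted_eq_foldl_insertBy, ih hu]
    have hG0 : pvTagRow u = pvG u q 0 := by
      funext j; simp [pvG]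
    rw [hG0]
    have h0 : PySem.List.enumerate q 0 = PySem.List.enumerate (q.drop 0) (((0 : Nat) : Nat) : Int) := by
      simp
    rw [h0, pvInsertBlock q M hq u q.length 0 (by omega)]
    apply List.flatMap_congr
    intro j _
    by_cases hj : j < q.length
    · simp [pvG, pvTagRow, List.filter_append, hj]
    · simp [pvG, pvTagRow, List.filter_append, hj]

-- B's tagged list is the concatenation of the enumerated per-speaker pair lists
lemma pvTaggedB : ∀ (c : List (String × List Int)) (acc : List (Int × (String × Int × Int))),
    c.foldl (fun acc p => acc ++ PySem.List.enumerate
      ((PySem.List.pyRange 0 (p.2.length : Int) 1).flatMap (fun i =>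
        (PySem.List.pyRange (i + 1) (p.2.length : Int) 1).map (fun j => (p.1, i, j)))) 0) acc
    = acc ++ ((c.map (fun p => pvSpeakerPairs p.1 p.2)).map
        (fun q => PySem.List.enumerate q 0)).flatten
  | [], acc => by simp
  | p :: c, acc => by
    simp only [List.foldl_cons, List.map_cons, List.flatten_cons]
    rw [pvTaggedB c]
    simp [pvSpeakerPairs]

-- dropping the tags from layer k gives A's row k
lemma pvMapSnd_tagRow (u : List (List (String × Int × Int))) (k : Nat) :
    (pvTagRow u k).map (fun t => t.2) = pvRow u k := by
  simp [pvTagRow, pvRow, List.map_map]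

-- ===== VERDICT (by name: the statement is the Claim_ definition above) =====
theorem find_positive_pairs_spec : Claim_equal_find_positive_pairs := by
  intro c _ hpre
  unfold Pre_find_positive_pairs at hpre
  unfold Spec_find_positive_pairs
  have hu0 : c.foldl (fun acc p =>
      acc ++ [(pvCombs2 (PySem.List.pyRange 0 (p.2.length : Int) 1)).map (fun idx => (p.1, idx.1, idx.2))]) []
      = c.map (fun p => pvSpeakerPairs p.1 p.2) := by
    rw [PySem.List.foldl_append_singleton_eq_map, List.nil_append]
    exact List.map_congr_left (fun p _ => pvCombs2_pyRange p.1 (p.2.length : Int) 0)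
  simp only [find_positive_pairs, find_positive_pairs_alt]
  rw [hu0, pvTaggedB c [], List.nil_append]
  split
  next h =>
    exfalso
    have := (PySem.List.max?_eq_none_iff _ _).mp h
    simp only [List.map_eq_nil_iff] at this
    exact hpre this
  next mp h =>
    have hub : ∀ q ∈ c.map (fun p => pvSpeakerPairs p.1 p.2), q.length ≤ mp.toNat := by
      intro q hq
      have hle := PySem.List.max?_isMax h ((q.length : Int)) (List.mem_map_of_mem hq)
      have hle' : (q.length : Int) ≤ mp := hle
      omega
    rw [pvSorted_eq mp.toNat (c.map (fun p => pvSpeakerPairs p.1 p.2)) hub]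
    have hmp : mp = ((mp.toNat : Nat) : Int) := by
      have hmem := PySem.List.max?_mem h
      obtain ⟨q0, _, hq0e⟩ := List.mem_map.mp hmem
      omega
    rw [hmp, PySem.List.pyRange_one]
    simp only [Int.sub_zero, Int.toNat_natCast, zero_add]
    rw [List.foldl_map]
    have hbody : (fun (acc : List (String × Int × Int)) (k : Nat) =>
        (c.map (fun p => pvSpeakerPairs p.1 p.2)).foldl (fun acc2 q =>
          if ((k : Nat) : Int) + 1 ≤ (q.length : Int)
          then acc2 ++ [PySem.List.pyGetD q ((k : Nat) : Int) ("", 0, 0)] else acc2) acc)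
        = fun acc k => acc ++ pvRow (c.map (fun p => pvSpeakerPairs p.1 p.2)) k :=
      funext fun acc => funext fun k => pvRowA _ k acc
    rw [hbody]
    rw [List.map_flatMap]
    rw [List.flatMap_congr (fun k _ => pvMapSnd_tagRow (c.map (fun p => pvSpeakerPairs p.1 p.2)) k)]
    rw [PySem.List.foldl_append_eq_flatMap]
    simp
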